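-- pv_equiv track=rewrite | github.com/RowanTL/N-count | count_consecutive_Ns.py | count_consecutive_Ns
-- ===== SOURCE A (Python) =====
-- def count_consecutive_Ns(sequence):
--     """
--     Counts the consecutive 'N's in the given genome sequence.
--     Args: sequence (str): The genome sequence as a string.
--     Returns: dict: A dictionary with the number of consecutive 'N's as keys and
--           their frequencies as values.
--     """
--     counts = {}
--     i = 0
--     n = len(sequence)
--
--     while i < n:
--         if sequence[i] == 'N':
--             count = 0
--             while i < n and sequence[i] == 'N':
--                 count += 1
--                 i += 1
--             if count in counts:
--                 counts[count] += 1
--             else: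
--                 counts[count] = 1
--         else:
--             i += 1
--
--     return counts
-- ===== SOURCE B (Python) =====
-- def count_consecutive_Ns(sequence):
--     n = len(sequence)
--     starts = [i for i in range(n)
--               if sequence[i] == 'N' and (i == 0 or sequence[i - 1] != 'N')]
--     ends = [i for i in range(n)
--             if sequence[i] == 'N' and (i + 1 == n or sequence[i + 1] != 'N')]
--     counts = {}
--     for s, e in zip(starts, ends):
--         length = e - s + 1
--         counts[length] = counts.get(length, 0) + 1
--     return counts
-- ===== Notes on version B (the rewrite author's own statement) =====
-- stated objective: alternative
-- what changed: Replaces A's nested while-loop run scan by boundary detection: two comprehensions find the run start and end indices via neighbour comparison, and zipping them yields each run length in one arithmetic step.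
import Mathlib
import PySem

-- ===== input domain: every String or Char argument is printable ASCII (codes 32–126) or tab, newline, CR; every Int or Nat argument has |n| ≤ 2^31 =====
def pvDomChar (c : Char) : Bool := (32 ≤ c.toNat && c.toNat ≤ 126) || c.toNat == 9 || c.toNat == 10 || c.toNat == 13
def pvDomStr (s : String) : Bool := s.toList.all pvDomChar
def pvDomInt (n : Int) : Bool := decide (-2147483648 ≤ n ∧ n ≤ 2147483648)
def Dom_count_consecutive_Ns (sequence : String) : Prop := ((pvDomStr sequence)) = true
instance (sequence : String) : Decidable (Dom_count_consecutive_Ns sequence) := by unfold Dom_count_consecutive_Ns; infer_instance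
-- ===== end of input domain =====

-- B replaces A's nested while-loop run scan by boundary detection: run start/end indices
-- found by neighbour comparison, run lengths by zipping them (objective: alternative, same O(n)).

-- ===== PORT A =====

-- inner while loop of A: count the leading 'N's and return (count, remaining characters)
def pvTakeNs : List Char → Int × List Char
  | [] => (0, [])
  | c :: rest =>
    if c = 'N' then
      let p := pvTakeNs rest
      (p.1 + 1, p.2)
    else (0, c :: rest)

theorem pvTakeNs_len : ∀ (l : List Char), (pvTakeNs l).2.length ≤ l.length := by
  intro l
  induction l with
  | nil => simp [pvTakeNs]
  | cons c rest ih =>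
    by_cases h : c = 'N'
    · simp [pvTakeNs, h]; omega
    · simp [pvTakeNs, h]

-- outer while loop of A over the remaining characters, threading the counts dict
def pvALoop : List Char → PySem.Dict Int Int → PySem.Dict Int Int
  | [], counts => counts
  | c :: rest, counts =>
    if _h : c = 'N' then
      let p := pvTakeNs (c :: rest)
      let counts' :=
        match counts.get? p.1 with
        | some v => counts.insert p.1 (v + 1)
        | none => counts.insert p.1 1
      pvALoop p.2 counts'
    else pvALoop rest counts
termination_by l _ => l.length
decreasing_by
  · have := pvTakeNs_len rest
    simp [pvTakeNs, _h]
    omega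
  · simp

def count_consecutive_Ns (sequence : String) : List (Int × Int) :=
  (pvALoop sequence.toList PySem.Dict.empty).items

-- ===== PORT B =====

-- sequence[i] == 'N' and (i == 0 or sequence[i-1] != 'N')
-- (the tested indices are always in range, so getD with a dummy default is exact here)
def pvStartP (l : List Char) (i : Nat) : Bool :=
  (l.getD i ' ' == 'N') && (decide (i = 0) || l.getD (i - 1) ' ' != 'N')

-- sequence[i] == 'N' and (i + 1 == n or sequence[i+1] != 'N')
def pvEndP (l : List Char) (i : Nat) : Bool :=
  (l.getD i ' ' == 'N') && (decide (i + 1 = l.length) || l.getD (i + 1) ' ' != 'N')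

def pvStarts (l : List Char) : List Nat := (List.range l.length).filter (pvStartP l)
def pvEnds (l : List Char) : List Nat := (List.range l.length).filter (pvEndP l)

def count_consecutive_Ns_alt (sequence : String) : List (Int × Int) :=
  let l := sequence.toList
  (((pvStarts l).zip (pvEnds l)).foldl
    (fun counts se =>
      let len : Int := (se.2 : Int) - (se.1 : Int) + 1
      counts.insert len (counts.getD len 0 + 1))
    PySem.Dict.empty).items

-- ===== PRECONDITION & SPEC =====
def Spec_count_consecutive_Ns (sequence : String) (out : List (Int × Int)) : Prop := out = count_consecutive_Ns_alt sequence
instance (sequence : String) (out : List (Int × Int)) : Decidable (Spec_count_consecutive_Ns sequence out) := by unfold Spec_count_consecutive_Ns; infer_instance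

-- ===== CLAIM (what is proved, stated in full; the proofs are below) =====
def Claim_equal_count_consecutive_Ns : Prop := ∀ (sequence : String), Dom_count_consecutive_Ns sequence → Spec_count_consecutive_Ns sequence (count_consecutive_Ns sequence)

-- ===== LEMMAS AND PROOFS =====

-- proof-side: the list of lengths of the maximal 'N' runs, in order
def NrunLens : List Char → List Int
  | [] => []
  | c :: rest =>
    let r := NrunLens rest
    if c = 'N' then
      if rest.getD 0 ' ' = 'N' then (r.headD 0 + 1) :: r.tail else 1 :: r
    else r

-- the dict update both programs perform for a run length k
def pvBump (d : PySem.Dict Int Int) (k : Int) : PySem.Dict Int Int :=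
  d.insert k (d.getD k 0 + 1)

theorem pvBump_eq (d : PySem.Dict Int Int) (k : Int) :
    (match d.get? k with
     | some v => d.insert k (v + 1)
     | none => d.insert k 1) = pvBump d k := by
  cases h : d.get? k <;> simp [pvBump, PySem.Dict.getD, h]

theorem NrunLens_ne_nil (rest : List Char) (h : rest.getD 0 ' ' = 'N') :
    NrunLens rest ≠ [] := by
  match rest with
  | [] => simp [List.getD] at h
  | c :: t =>
    simp [List.getD] at h
    subst h
    simp only [NrunLens, if_pos trivial]
    split <;> simp

theorem NrunLens_take : ∀ (rest : List Char),
    NrunLens ('N' :: rest) = ((pvTakeNs rest).1 + 1) :: NrunLens (pvTakeNs rest).2 := by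
  intro rest
  induction rest with
  | nil => simp [NrunLens, pvTakeNs]
  | cons d rest' ih =>
    by_cases h : d = 'N'
    · subst h
      rw [NrunLens]
      simp only [List.getD, List.getElem?_cons_zero, Option.getD_some]
      rw [ih]
      simp [pvTakeNs]
    · simp [NrunLens, pvTakeNs, h, List.getD]

theorem pvALoop_eq_fold : ∀ (n : Nat) (l : List Char), l.length ≤ n →
    ∀ (counts : PySem.Dict Int Int),
      pvALoop l counts = (NrunLens l).foldl pvBump counts := by
  intro n
  induction n with
  | zero =>
    intro l hl counts
    have : l = [] := List.eq_nil_of_length_eq_zero (Nat.le_zero.mp hl)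
    subst this
    simp [pvALoop, NrunLens]
  | succ n ih =>
    intro l hl counts
    match l with
    | [] => simp [pvALoop, NrunLens]
    | c :: rest =>
      by_cases h : c = 'N'
      · subst h
        rw [pvALoop, dif_pos rfl]
        have hp : pvTakeNs ('N' :: rest) = ((pvTakeNs rest).1 + 1, (pvTakeNs rest).2) := by
          simp [pvTakeNs]
        simp only [hp, pvBump_eq]
        rw [NrunLens_take, List.foldl_cons]
        have hlen := pvTakeNs_len rest
        rw [ih _ (by simp at hl; omega)]
      · rw [pvALoop]
        simp only [h, dite_false]
        rw [ih _ (by simp at hl; omega)]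
        have : NrunLens (c :: rest) = NrunLens rest := by simp [NrunLens, h]
        rw [this]

-- the length of a boundary pair, as B computes it
def pvLenOf (se : Nat × Nat) : Int := (se.2 : Int) - (se.1 : Int) + 1

theorem pvLen_zip_shift : ∀ (A B : List Nat),
    ((A.map (· + 1)).zip (B.map (· + 1))).map pvLenOf = (A.zip B).map pvLenOf := by
  intro A
  induction A with
  | nil => intro B; simp
  | cons a A2 ih =>
    intro B
    match B with
    | [] => simp
    | b :: B2 =>
      simp only [List.map_cons, List.zip_cons_cons, ih]
      congr 1
      unfold pvLenOf
      push_cast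
      ring

theorem pvFiltSucc (p : Nat → Bool) (n : Nat) :
    (List.range (n + 1)).filter p =
      (if p 0 then [0] else []) ++ ((List.range n).filter (fun i => p (i + 1))).map (· + 1) := by
  rw [List.range_succ_eq_map, List.filter_cons, List.filter_map]
  cases h : p 0 <;> simp [Function.comp_def, Nat.succ_eq_add_one]

theorem pvStarts_cons_notN (c : Char) (rest : List Char) (h : c ≠ 'N') :
    pvStarts (c :: rest) = (pvStarts rest).map (· + 1) := by
  unfold pvStarts
  rw [show (c :: rest).length = rest.length + 1 from rfl, pvFiltSucc]
  have h0 : pvStartP (c :: rest) 0 = false := by simp [pvStartP, List.getD, h]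
  rw [h0]
  simp only [Bool.false_eq_true, if_false, List.nil_append]
  congr 1
  apply List.filter_congr
  intro i _
  match i with
  | 0 => simp [pvStartP, List.getD, h]
  | Nat.succ j => simp [pvStartP, List.getD]

theorem pvStarts_cons_N_notN (rest : List Char) (h0 : rest.getD 0 ' ' ≠ 'N') :
    pvStarts ('N' :: rest) = 0 :: (pvStarts rest).map (· + 1) := by
  unfold pvStarts
  rw [show ('N' :: rest).length = rest.length + 1 from rfl, pvFiltSucc]
  have hp0 : pvStartP ('N' :: rest) 0 = true := by simp [pvStartP, List.getD]
  rw [hp0]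
  simp only [if_true, List.singleton_append, List.cons.injEq, true_and]
  congr 1
  apply List.filter_congr
  intro i _
  simp [List.getD] at h0
  match i with
  | 0 => simp [pvStartP, List.getD, h0]
  | Nat.succ j => simp [pvStartP, List.getD]

theorem pvStarts_cons_N_N (rest : List Char) (h0 : rest.getD 0 ' ' = 'N') :
    pvStarts ('N' :: rest) = 0 :: ((pvStarts rest).tail).map (· + 1) := by
  match rest with
  | [] => simp [List.getD] at h0
  | d :: t =>
    simp [List.getD] at h0
    subst h0
    unfold pvStarts
    have hR : (List.range ('N' :: t).length).filter (pvStartP ('N' :: t)) =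
        (if pvStartP ('N' :: t) 0 then [0] else []) ++
          ((List.range t.length).filter (fun i => pvStartP ('N' :: t) (i + 1))).map (· + 1) :=
      pvFiltSucc _ _
    rw [show ('N' :: 'N' :: t).length = (t.length + 1) + 1 from rfl, pvFiltSucc, hR]
    have hp0 : pvStartP ('N' :: 'N' :: t) 0 = true := by simp [pvStartP, List.getD]
    have hq0 : pvStartP ('N' :: t) 0 = true := by simp [pvStartP, List.getD]
    rw [hp0, hq0]
    simp only [if_true, List.singleton_append, List.tail_cons, List.cons.injEq, true_and]
    rw [pvFiltSucc]
    have hr0 : pvStartP ('N' :: 'N' :: t) (0 + 1) = false := by simp [pvStartP, List.getD]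
    rw [hr0]
    simp only [Bool.false_eq_true, if_false, List.nil_append, List.map_map]
    have := List.filter_congr (l := List.range t.length)
      (p := fun i => pvStartP ('N' :: 'N' :: t) (i + 1 + 1))
      (q := fun i => pvStartP ('N' :: t) (i + 1))
      (by intro i _
          match i with
          | 0 => simp [pvStartP, List.getD]
          | Nat.succ j => simp [pvStartP, List.getD])
    rw [this]

theorem pvEnds_cons_notN (c : Char) (rest : List Char) (h : c ≠ 'N') :
    pvEnds (c :: rest) = (pvEnds rest).map (· + 1) := by
  unfold pvEnds
  rw [show (c :: rest).length = rest.length + 1 from rfl, pvFiltSucc]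
  have h0 : pvEndP (c :: rest) 0 = false := by simp [pvEndP, List.getD, h]
  rw [h0]
  simp only [Bool.false_eq_true, if_false, List.nil_append]
  congr 1
  apply List.filter_congr
  intro i _
  simp [pvEndP, List.getD]

theorem pvEnds_cons_N_notN (rest : List Char) (h0 : rest.getD 0 ' ' ≠ 'N') :
    pvEnds ('N' :: rest) = 0 :: (pvEnds rest).map (· + 1) := by
  unfold pvEnds
  rw [show ('N' :: rest).length = rest.length + 1 from rfl, pvFiltSucc]
  have hp0 : pvEndP ('N' :: rest) 0 = true := by
    match rest with
    | [] => simp [pvEndP, List.getD]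
    | d :: t => simp [List.getD] at h0; simp [pvEndP, List.getD, h0]
  rw [hp0]
  simp only [if_true, List.singleton_append, List.cons.injEq, true_and]
  congr 1
  apply List.filter_congr
  intro i _
  simp [pvEndP, List.getD]

theorem pvEnds_cons_N_N (rest : List Char) (h0 : rest.getD 0 ' ' = 'N') :
    pvEnds ('N' :: rest) = (pvEnds rest).map (· + 1) := by
  unfold pvEnds
  rw [show ('N' :: rest).length = rest.length + 1 from rfl, pvFiltSucc]
  have hp0 : pvEndP ('N' :: rest) 0 = false := by
    match rest with
    | [] => simp [List.getD] at h0
    | d :: t => simp [List.getD] at h0; simp [pvEndP, List.getD, h0]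
  rw [hp0]
  simp only [Bool.false_eq_true, if_false, List.nil_append]
  congr 1
  apply List.filter_congr
  intro i _
  simp [pvEndP, List.getD]

-- when the string starts with 'N', index 0 is a run start
theorem pvStarts_head_N (rest : List Char) (h0 : rest.getD 0 ' ' = 'N') :
    pvStarts rest = 0 :: (pvStarts rest).tail := by
  match rest with
  | [] => simp [List.getD] at h0
  | d :: t =>
    simp [List.getD] at h0
    subst h0
    by_cases ht : t.getD 0 ' ' = 'N'
    · rw [pvStarts_cons_N_N t ht]; rfl
    · rw [pvStarts_cons_N_notN t ht]; rfl

-- main B-side lemma: the boundary pairs yield exactly the run lengths, in order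
theorem pvZip_eq_NrunLens : ∀ (n : Nat) (l : List Char), l.length ≤ n →
    ((pvStarts l).zip (pvEnds l)).map pvLenOf = NrunLens l := by
  intro n
  induction n with
  | zero =>
    intro l hl
    have : l = [] := List.eq_nil_of_length_eq_zero (Nat.le_zero.mp hl)
    subst this
    simp [pvStarts, pvEnds, NrunLens]
  | succ n ih =>
    intro l hl
    match l with
    | [] => simp [pvStarts, pvEnds, NrunLens]
    | c :: rest =>
      have hr : rest.length ≤ n := by simp at hl; omega
      have hrest := ih rest hr
      by_cases h : c = 'N'
      · subst h
        by_cases h0 : rest.getD 0 ' ' = 'N'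
        · -- the leading 'N' extends rest's first run: absorb it
          rw [pvStarts_cons_N_N rest h0, pvEnds_cons_N_N rest h0]
          have hne : NrunLens rest ≠ [] := NrunLens_ne_nil rest h0
          match hE : pvEnds rest with
          | [] =>
            exfalso
            rw [hE] at hrest
            simp at hrest
            exact hne hrest
          | e0 :: E2 =>
            have hS := pvStarts_head_N rest h0
            rw [hS, hE] at hrest
            simp only [List.zip_cons_cons, List.map_cons] at hrest
            rw [List.map_cons, List.zip_cons_cons, List.map_cons, pvLen_zip_shift]
            rw [NrunLens, if_pos rfl, if_pos h0, ← hrest]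
            simp only [List.headD_cons, List.tail_cons, List.cons.injEq]
            refine ⟨?_, trivial⟩
            unfold pvLenOf
            push_cast
            ring
        · -- a fresh run of length 1 at index 0
          rw [pvStarts_cons_N_notN rest h0, pvEnds_cons_N_notN rest h0]
          rw [List.zip_cons_cons, List.map_cons, pvLen_zip_shift, hrest]
          rw [NrunLens, if_pos rfl, if_neg h0]
          norm_num [pvLenOf]
      · -- c is not 'N': every boundary index shifts by one
        rw [pvStarts_cons_notN c rest h, pvEnds_cons_notN c rest h, pvLen_zip_shift, hrest]
        simp [NrunLens, h]

-- ===== VERDICT (by name: the statement is the Claim_ definition above) =====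
theorem count_consecutive_Ns_spec : Claim_equal_count_consecutive_Ns := by
  intro sequence _
  unfold Spec_count_consecutive_Ns count_consecutive_Ns count_consecutive_Ns_alt
  rw [pvALoop_eq_fold sequence.toList.length sequence.toList le_rfl]
  rw [← pvZip_eq_NrunLens sequence.toList.length sequence.toList le_rfl]
  rw [List.foldl_map]
  rfl
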